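-- pv_equiv track=rewrite | github.com/gbeatrix/py-practice | matchdict.py | generate_attempts
-- ===== SOURCE A (Python) =====
-- def generate_attempts(pattern):
--     results = set()
--     length = len(pattern)
--     i = length
--     j = 0
--     while i>0 and i+j <= length:
--         result = pattern[j:j+i]
--         if result not in results:
--             yield result
--             results.add(result)
--         if i+j == length:
--             j = 0
--             i = i-1
--         else:
--             j = j+1
-- ===== SOURCE B (Python) =====
-- def generate_attempts(pattern):
--     # Index every substring by its first (leftmost) occurrence in one start-major
--     # scan, then emit keys sorted by (-length, first start): no online dedup order.
--     n = len(pattern)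
--     first = {}
--     for j in range(n):
--         for i in range(1, n - j + 1):
--             s = pattern[j:j + i]
--             if s not in first:
--                 first[s] = (-i, j)
--     for s, _ in sorted(first.items(), key=lambda kv: kv[1]):
--         yield s
-- ===== Notes on version B (the rewrite author's own statement) =====
-- stated objective: alternative
-- what changed: Instead of emitting substrings online in length-major order with a global seen-set, B scans start-major once, indexing each distinct substring by its leftmost occurrence in a dict, and then sorts the index entries by the (-length, first-start) key to produce the output order.
import Mathlib
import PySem

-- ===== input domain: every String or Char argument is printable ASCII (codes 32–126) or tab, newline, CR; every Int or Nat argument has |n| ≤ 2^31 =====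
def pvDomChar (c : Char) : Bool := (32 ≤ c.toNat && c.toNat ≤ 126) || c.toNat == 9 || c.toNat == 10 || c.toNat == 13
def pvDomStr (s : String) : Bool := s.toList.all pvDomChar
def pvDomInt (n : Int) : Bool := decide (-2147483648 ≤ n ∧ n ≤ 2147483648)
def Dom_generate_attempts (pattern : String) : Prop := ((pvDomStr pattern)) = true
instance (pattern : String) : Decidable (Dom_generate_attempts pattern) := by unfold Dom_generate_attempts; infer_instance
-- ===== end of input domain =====

-- B replaces A's online length-major emission with a global seen-set by one start-major scan
-- that indexes every distinct substring by its leftmost occurrence, followed by a sort of the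
-- index entries on the (-length, first-start) key.

-- ===== PORT A =====
-- A's while loop: state (i, j, results, acc); fuel only makes the recursion total
-- (one unit per iteration; the wrapper passes more than the loop can ever use).
def gaLoop (pattern : String) (length : Int) (fuel : Nat) (i j : Int)
    (results : PySem.Set String) (acc : List String) : List String :=
  match fuel with
  | 0 => acc
  | fuel + 1 =>
    if i > 0 ∧ i + j ≤ length then
      let result := PySem.Str.slice pattern (some j) (some (j + i))
      let results' := if result ∈ results then results else PySem.Set.add results result
      let acc' := if result ∈ results then acc else acc ++ [result]
      if i + j = length then gaLoop pattern length fuel (i - 1) 0 results' acc'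
      else gaLoop pattern length fuel i (j + 1) results' acc'
    else acc

def generate_attempts (pattern : String) : List String :=
  let length := PySem.Str.len pattern
  gaLoop pattern length ((length.toNat + 1) * (length.toNat + 1)) length 0 PySem.Set.empty []

-- ===== PORT B =====
def generate_attempts_alt (pattern : String) : List String :=
  let n := PySem.Str.len pattern
  let first := (PySem.List.pyRange 0 n 1).foldl (fun d j =>
      (PySem.List.pyRange 1 (n - j + 1) 1).foldl (fun d i =>
        let s := PySem.Str.slice pattern (some j) (some (j + i))
        if d.contains s then d else d.insert s (-i, j)) d)
    (PySem.Dict.empty : PySem.Dict String (Int × Int))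
  (PySem.List.sorted2 first.items (fun kv => kv.2.1) (fun kv => kv.2.2)).map (fun kv => kv.1)

-- ===== PRECONDITION & SPEC =====
def Spec_generate_attempts (pattern : String) (out : List String) : Prop := out = generate_attempts_alt pattern
instance (pattern : String) (out : List String) : Decidable (Spec_generate_attempts pattern out) := by unfold Spec_generate_attempts; infer_instance

-- ===== CLAIM (what is proved, stated in full; the proofs are below) =====
def Claim_equal_generate_attempts : Prop := ∀ (pattern : String), Dom_generate_attempts pattern → Spec_generate_attempts pattern (generate_attempts pattern)

-- ===== LEMMAS AND PROOFS =====

-- ---------- A-side: the while loop produces the rows, length-major ----------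

-- the substrings of length i starting at j, j+1, …, n-i (a "row" of the traversal)
def gaRow (pattern : String) (n i b : Int) : List String :=
  (PySem.List.pyRange b (n - i + 1) 1).map (fun j => PySem.Str.slice pattern (some j) (some (j + i)))

-- rows of lengths a, a-1, …, 1, each from start 0
def gaRows (pattern : String) (n : Int) : Nat → List String
  | 0 => []
  | a + 1 => gaRow pattern n (a + 1) 0 ++ gaRows pattern n a

lemma gaRow_cons (pattern : String) (n i b : Int) (h : b + i ≤ n) :
    gaRow pattern n i b =
      PySem.Str.slice pattern (some b) (some (b + i)) :: gaRow pattern n i (b + 1) := by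
  unfold gaRow
  rw [PySem.List.pyRange_one_cons (by omega)]
  simp

lemma gaRow_last (pattern : String) (n i b : Int) (h : b + i = n) :
    gaRow pattern n i b = [PySem.Str.slice pattern (some b) (some (b + i))] := by
  unfold gaRow
  have : n - i + 1 = b + 1 := by omega
  rw [this, PySem.List.pyRange_one_cons (by omega), PySem.List.pyRange_one_eq_nil (by omega)]
  simp

-- one full row of the loop, starting at column b with d columns left after b
lemma gaLoop_row (pattern : String) (n : Int) (a : Nat) :
    ∀ (d : Nat) (b : Int) (f : Nat) (R : PySem.Set String),
      0 ≤ b → b + ((a : Int) + 1) + d = n →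
      gaLoop pattern n (f + (d + 1)) ((a : Int) + 1) b R R =
        gaLoop pattern n f (a : Int) 0 ((gaRow pattern n ((a : Int) + 1) b).foldl PySem.Set.add R)
          ((gaRow pattern n ((a : Int) + 1) b).foldl PySem.Set.add R) := by
  intro d
  induction d with
  | zero =>
    intro b f R hb hend
    rw [gaLoop]
    have hc : ((a : Int) + 1 > 0 ∧ (a : Int) + 1 + b ≤ n) := by omega
    rw [if_pos hc, if_pos (by omega)]
    rw [gaRow_last pattern n _ b (by omega)]
    have : (a : Int) + 1 - 1 = (a : Int) := by omega
    simp only [this, List.foldl_cons, List.foldl_nil, PySem.Set.add]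
    by_cases hm : PySem.Str.slice pattern (some b) (some (b + ((a : Int) + 1))) ∈ R <;>
      simp [hm, PySem.Set.contains, List.contains_eq_mem]
  | succ d ih =>
    intro b f R hb hend
    rw [show f + (d + 1 + 1) = (f + (d + 1)) + 1 from by omega, gaLoop]
    have hc : ((a : Int) + 1 > 0 ∧ (a : Int) + 1 + b ≤ n) := by omega
    rw [if_pos hc, if_neg (by omega)]
    rw [gaRow_cons pattern n _ b (by omega)]
    rw [show b + ((a : Int) + 1) = (a : Int) + 1 + b by ring] at *
    simp only [List.foldl_cons]
    have step : ∀ (x : String),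
        (if x ∈ R then R else PySem.Set.add R x) = PySem.Set.add R x := by
      intro x
      by_cases hm : x ∈ R <;> simp [hm, PySem.Set.add, PySem.Set.contains, List.contains_eq_mem]
    have step2 : ∀ (x : String),
        (if x ∈ R then R else R ++ [x]) = PySem.Set.add R x := by
      intro x
      by_cases hm : x ∈ R <;> simp [hm, PySem.Set.add, PySem.Set.contains, List.contains_eq_mem]
    rw [step2]
    rw [show (a : Int) + 1 + b = b + ((a : Int) + 1) by ring, step]
    exact ih (b + 1) f (PySem.Set.add R (PySem.Str.slice pattern (some b) (some (b + ((a : Int) + 1))))) (by omega) (by omega)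

-- the whole loop, rows a down to 1, as a fold over gaRows
lemma gaLoop_rows (pattern : String) (n : Int) :
    ∀ (a : Nat) (f : Nat) (R : PySem.Set String), (a : Int) ≤ n → a * (n.toNat + 1) ≤ f →
      gaLoop pattern n f (a : Int) 0 R R = (gaRows pattern n a).foldl PySem.Set.add R := by
  intro a
  induction a with
  | zero =>
    intro f R _ _
    match f with
    | 0 => simp [gaLoop, gaRows]
    | f + 1 =>
      rw [gaLoop.eq_def]
      norm_num [gaRows]
  | succ a ih =>
    intro f R hle hf
    have hd : ∃ d : Nat, (0 : Int) + ((a : Int) + 1) + d = n := ⟨(n - a - 1).toNat, by omega⟩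
    obtain ⟨d, hdn⟩ := hd
    have hfuel : d + 1 ≤ f := by
      have : (d : Int) = n - a - 1 := by omega
      have hn : d + 1 ≤ n.toNat + 1 := by omega
      calc d + 1 ≤ n.toNat + 1 := hn
        _ ≤ (a + 1) * (n.toNat + 1) := by nlinarith
        _ ≤ f := hf
    obtain ⟨f', rfl⟩ : ∃ f', f = f' + (d + 1) := ⟨f - (d + 1), by omega⟩
    have := gaLoop_row pattern n a d 0 f' R (le_refl 0) hdn
    push_cast at this ⊢
    rw [this]
    rw [gaRows]
    rw [List.foldl_append]
    apply ih
    · omega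
    · have : d ≤ n.toNat := by omega
      nlinarith

-- ---------- generic list/set lemmas ----------

lemma update_append_left {α : Type} [BEq α] [LawfulBEq α] (s : List α) :
    ∀ (t u : List α), (∀ z ∈ t, z ∉ s) → (∀ z ∈ u, z ∉ s) →
      PySem.Set.update (s ++ u) t = s ++ PySem.Set.update u t := by
  intro t
  induction t with
  | nil => intro u _ _; rfl
  | cons z t ih =>
    intro u hts hus
    show PySem.Set.update (PySem.Set.add (s ++ u) z) t = s ++ PySem.Set.update (PySem.Set.add u z) t
    have hzs : z ∉ s := hts z (by simp)
    by_cases hz : z ∈ u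
    · have h1 : PySem.Set.add (s ++ u) z = s ++ u := by
        simp [PySem.Set.add, PySem.Set.contains, List.contains_eq_mem, hz]
      have h2 : PySem.Set.add u z = u := by
        simp [PySem.Set.add, PySem.Set.contains, List.contains_eq_mem, hz]
      rw [h1, h2]
      exact ih u (fun w hw => hts w (by simp [hw])) hus
    · have h1 : PySem.Set.add (s ++ u) z = s ++ (u ++ [z]) := by
        simp [PySem.Set.add, PySem.Set.contains, List.contains_eq_mem, hz, hzs]
      have h2 : PySem.Set.add u z = u ++ [z] := by
        simp [PySem.Set.add, PySem.Set.contains, List.contains_eq_mem, hz]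
      rw [h1, h2]
      refine ih (u ++ [z]) (fun w hw => hts w (by simp [hw])) ?_
      intro w hw
      rcases List.mem_append.mp hw with h | h
      · exact hus w h
      · simp at h; subst h; exact hzs

lemma ofList_append_of_disjoint {α : Type} [BEq α] [LawfulBEq α] (xs ys : List α)
    (h : ∀ y ∈ ys, y ∉ xs) :
    PySem.Set.ofList (xs ++ ys) = PySem.Set.ofList xs ++ PySem.Set.ofList ys := by
  rw [PySem.Set.ofList_append]
  have hys : ∀ y ∈ ys, y ∉ PySem.Set.ofList xs := by
    intro y hy hmem
    exact h y hy ((PySem.Set.mem_ofList xs y).mp hmem)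
  have := update_append_left (PySem.Set.ofList xs) ys [] hys (by simp)
  simpa using this

-- find? of a predicate with a unique witness
lemma find?_eq_some_of_unique {α : Type} {p : α → Bool} {a : α} :
    ∀ {l : List α}, a ∈ l → p a = true → (∀ x ∈ l, p x = true → x = a) →
      l.find? p = some a := by
  intro l
  induction l with
  | nil => intro h _ _; cases h
  | cons x t ih =>
    intro ha hp hu
    by_cases hx : p x = true
    · have hxa : x = a := hu x (by simp) hx
      subst hxa
      simp [List.find?, hx]
    · have hx' : p x = false := by simpa using hx
      have hax : a ≠ x := fun h => hx (h ▸ hp)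
      have hat : a ∈ t := by
        rcases List.mem_cons.mp ha with h | h
        · exact absurd h hax
        · exact h
      simp only [List.find?, hx']
      exact ih hat hp (fun y hy hpy => hu y (by simp [hy]) hpy)

-- ofList of a mapped strictly increasing index list: entries are ordered by their first index
lemma ofList_map_find_pairwise {α : Type} [BEq α] [LawfulBEq α]
    (f : Int → α) : ∀ (l : List Int), l.Pairwise (· < ·) →
    (PySem.Set.ofList (l.map f)).Pairwise (fun a b =>
      ∃ ja jb, l.find? (fun j => f j == a) = some ja ∧ l.find? (fun j => f j == b) = some jb ∧ ja < jb) := by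
  intro l
  induction l using List.reverseRecOn with
  | nil => intro _; exact List.Pairwise.nil
  | append_singleton l' j ih =>
    intro hl
    have hsplit := List.pairwise_append.mp hl
    have hl' := hsplit.1
    have hlt : ∀ x ∈ l', x < j := fun x hx => hsplit.2.2 x hx j (by simp)
    have ihp := ih hl'
    have hup : ∀ (x : α) (jx : Int), l'.find? (fun j' => f j' == x) = some jx →
        (l' ++ [j]).find? (fun j' => f j' == x) = some jx := by
      intro x jx h
      rw [List.find?_append, h]; rfl
    have key : ∀ a ∈ PySem.Set.ofList (l'.map f), ∃ ja, l'.find? (fun j' => f j' == a) = some ja := by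
      intro a ha
      have hmm : a ∈ l'.map f := (PySem.Set.mem_ofList _ _).mp ha
      obtain ⟨jx, hjx, rfl⟩ := List.mem_map.mp hmm
      cases hfind : l'.find? (fun j' => f j' == f jx) with
      | none =>
        exfalso
        rw [List.find?_eq_none] at hfind
        exact hfind jx hjx (by simp)
      | some ja => exact ⟨ja, rfl⟩
    rw [List.map_append]
    simp only [List.map_cons, List.map_nil]
    have hadd : PySem.Set.ofList (l'.map f ++ [f j])
        = PySem.Set.add (PySem.Set.ofList (l'.map f)) (f j) := by
      rw [PySem.Set.ofList_append]; rfl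
    rw [hadd]
    by_cases hmem : f j ∈ PySem.Set.ofList (l'.map f)
    · have heq : PySem.Set.add (PySem.Set.ofList (l'.map f)) (f j) = PySem.Set.ofList (l'.map f) := by
        simp [PySem.Set.add, PySem.Set.contains, List.contains_eq_mem, hmem]
      rw [heq]
      exact ihp.imp (fun {a b} h => by
        obtain ⟨ja, jb, h1, h2, h3⟩ := h
        exact ⟨ja, jb, hup _ _ h1, hup _ _ h2, h3⟩)
    · have heq : PySem.Set.add (PySem.Set.ofList (l'.map f)) (f j)
          = PySem.Set.ofList (l'.map f) ++ [f j] := by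
        simp [PySem.Set.add, PySem.Set.contains, List.contains_eq_mem, hmem]
      rw [heq, List.pairwise_append]
      refine ⟨ihp.imp (fun {a b} h => by
        obtain ⟨ja, jb, h1, h2, h3⟩ := h
        exact ⟨ja, jb, hup _ _ h1, hup _ _ h2, h3⟩), by simp, ?_⟩
      intro a ha b hb
      simp only [List.mem_singleton] at hb
      subst hb
      obtain ⟨ja, hja⟩ := key a ha
      have hnone : l'.find? (fun j' => f j' == f j) = none := by
        rw [List.find?_eq_none]
        intro x hx hbx
        exact hmem ((PySem.Set.mem_ofList _ _).mpr (List.mem_map.mpr ⟨x, hx, by simpa using hbx⟩))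
      refine ⟨ja, j, hup _ _ hja, ?_, hlt ja (List.mem_of_find?_eq_some hja)⟩
      rw [List.find?_append, hnone]
      simp [List.find?]

-- ---------- B-side definitions ----------

def bStep (d : PySem.Dict String (Int × Int)) (p : String × Int × Int) : PySem.Dict String (Int × Int) :=
  if d.contains p.1 then d else d.insert p.1 p.2

def keyAdd (acc : List (String × Int × Int)) (p : String × Int × Int) : List (String × Int × Int) :=
  if acc.any (fun q => q.1 == p.1) then acc else acc ++ [p]

def LB (pattern : String) (n : Int) : List (String × Int × Int) :=
  (PySem.List.pyRange 0 n 1).flatMap (fun j =>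
    (PySem.List.pyRange 1 (n - j + 1) 1).map (fun i =>
      (PySem.Str.slice pattern (some j) (some (j + i)), (-i, j))))

def jmF (pattern : String) (n : Int) (s : String) : Option Int :=
  (PySem.List.pyRange 0 n 1).find? (fun j => PySem.Str.slice pattern (some j) (some (j + PySem.Str.len s)) == s)

def valOf (pattern : String) (n : Int) (s : String) : Int × Int :=
  (-(PySem.Str.len s), (jmF pattern n s).getD 0)

lemma alt_eq (pattern : String) :
    generate_attempts_alt pattern =
      (PySem.List.sorted2 ((LB pattern (PySem.Str.len pattern)).foldl bStep PySem.Dict.empty).items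
        (fun kv => kv.2.1) (fun kv => kv.2.2)).map (fun kv => kv.1) := by
  unfold generate_attempts_alt LB bStep
  rw [List.foldl_flatMap]
  simp only [List.foldl_map]

lemma items_dictfold :
    ∀ (L : List (String × Int × Int)) (d : PySem.Dict String (Int × Int)),
      (L.foldl bStep d).items = L.foldl keyAdd d.items := by
  intro L
  induction L with
  | nil => intro d; rfl
  | cons p t ih =>
    intro d
    rw [List.foldl_cons, List.foldl_cons, ih (bStep d p)]
    congr 1
    have hiff : d.contains p.1 = true ↔ d.items.any (fun q => q.1 == p.1) = true := by
      rw [PySem.Dict.contains_eq_decide_mem_keys]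
      constructor
      · intro h'
        obtain ⟨q, hq, hqe⟩ := List.mem_map.mp (of_decide_eq_true h')
        exact List.any_eq_true.mpr ⟨q, hq, by simp [hqe]⟩
      · intro h'
        obtain ⟨q, hq, hqe⟩ := List.any_eq_true.mp h'
        exact decide_eq_true (List.mem_map.mpr ⟨q, hq, beq_iff_eq.mp hqe⟩)
    by_cases hc : d.contains p.1 = true
    · rw [bStep, if_pos hc, keyAdd, if_pos (hiff.mp hc)]
    · rw [bStep, if_neg hc, keyAdd, if_neg (fun h => hc (hiff.mpr h))]
      exact PySem.Dict.items_insert_of_not_contains d p.2 (by simpa using hc)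

lemma keyfold_mem (p : String × Int × Int) :
    ∀ (L : List (String × Int × Int)) (acc : List (String × Int × Int)),
      (p ∈ L.foldl keyAdd acc ↔
        p ∈ acc ∨ ((∀ q ∈ acc, q.1 ≠ p.1) ∧ L.find? (fun q => q.1 == p.1) = some p)) := by
  intro L
  induction L with
  | nil =>
    intro acc
    simp [List.find?]
  | cons r t ih =>
    intro acc
    rw [List.foldl_cons, ih (keyAdd acc r)]
    by_cases hk : r.1 = p.1
    · rw [List.find?_cons_of_pos (by simpa using hk)]
      by_cases hc : acc.any (fun q => q.1 == r.1) = true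
      · obtain ⟨q, hq, hqe⟩ := List.any_eq_true.mp hc
        have hqp : q.1 = p.1 := hk ▸ (beq_iff_eq.mp hqe)
        rw [keyAdd, if_pos hc]
        constructor
        · rintro (h | ⟨hno, hf⟩)
          · exact Or.inl h
          · exact absurd hqp (hno q hq)
        · rintro (h | ⟨hno, hf⟩)
          · exact Or.inl h
          · exact absurd hqp (hno q hq)
      · rw [keyAdd, if_neg hc]
        constructor
        · rintro (h | ⟨hno, hf⟩)
          · rcases List.mem_append.mp h with h' | h'
            · exact Or.inl h'
            · simp only [List.mem_singleton] at h'
              subst h'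
              exact Or.inr ⟨fun q hq hq1 => hc (List.any_eq_true.mpr ⟨q, hq, by simp [hq1]⟩), rfl⟩
          · exact absurd hk (hno r (by simp))
        · rintro (h | ⟨hno, hf⟩)
          · exact Or.inl (List.mem_append.mpr (Or.inl h))
          · have hrp : r = p := by injection hf
            exact Or.inl (List.mem_append.mpr (Or.inr (by simp [hrp])))
    · rw [List.find?_cons_of_neg (by simpa using hk)]
      by_cases hc : acc.any (fun q => q.1 == r.1) = true
      · rw [keyAdd, if_pos hc]
      · rw [keyAdd, if_neg hc]
        constructor
        · rintro (h | ⟨hno, hf⟩)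
          · rcases List.mem_append.mp h with h' | h'
            · exact Or.inl h'
            · simp only [List.mem_singleton] at h'
              subst h'
              exact absurd rfl hk
          · exact Or.inr ⟨fun q hq => hno q (List.mem_append.mpr (Or.inl hq)), hf⟩
        · rintro (h | ⟨hno, hf⟩)
          · exact Or.inl (List.mem_append.mpr (Or.inl h))
          · refine Or.inr ⟨?_, hf⟩
            intro q hq
            rcases List.mem_append.mp hq with h' | h'
            · exact hno q h'
            · simp only [List.mem_singleton] at h'
              subst h'
              exact hk

lemma keyfold_nodup :
    ∀ (L : List (String × Int × Int)) (acc : List (String × Int × Int)),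
      (acc.map (fun q => q.1)).Nodup → ((L.foldl keyAdd acc).map (fun q => q.1)).Nodup := by
  intro L
  induction L with
  | nil => intro acc h; exact h
  | cons r t ih =>
    intro acc h
    rw [List.foldl_cons]
    apply ih
    rw [keyAdd]
    by_cases hc : acc.any (fun q => q.1 == r.1) = true
    · rw [if_pos hc]; exact h
    · rw [if_neg hc, List.map_append, List.nodup_append]
      refine ⟨h, by simp, ?_⟩
      intro a ha b hb
      obtain ⟨q, hq, hqe⟩ := List.mem_map.mp ha
      have hb' : b = r.1 := by simpa using hb
      intro hab
      exact absurd (List.any_eq_true.mpr ⟨q, hq, by simp [hqe, hab, hb']⟩) hc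

-- ---------- slice lengths ----------

lemma len_slice_toList (pattern : String) (j i : Int) (h0 : 0 ≤ j) (hi : 0 ≤ i) :
    (PySem.Str.slice pattern (some j) (some (j + i))).toList
      = List.take ((j + i).toNat - j.toNat) (List.drop j.toNat pattern.toList) := by
  rw [PySem.Str.toList_slice, PySem.Chars.slice_eq_listSlice, PySem.List.slice_toNat _ h0 (by omega)]

lemma len_slice_of_le (pattern : String) (j i : Int) (h0 : 0 ≤ j) (hi : 0 ≤ i)
    (hin : j + i ≤ (pattern.toList.length : Int)) :
    PySem.Str.len (PySem.Str.slice pattern (some j) (some (j + i))) = i := by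
  rw [PySem.Str.len_eq, len_slice_toList pattern j i h0 hi]
  simp only [List.length_take, List.length_drop]
  omega

lemma len_slice_of_gt (pattern : String) (j i : Int) (h0 : 0 ≤ j) (hi : 0 ≤ i)
    (hjn : j ≤ (pattern.toList.length : Int)) (h : (pattern.toList.length : Int) < j + i) :
    PySem.Str.len (PySem.Str.slice pattern (some j) (some (j + i))) = (pattern.toList.length : Int) - j := by
  rw [PySem.Str.len_eq, len_slice_toList pattern j i h0 hi]
  simp only [List.length_take, List.length_drop]
  omega

-- ---------- find? over LB ----------

lemma find?_inner (pattern s : String) (j : Int)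
    (h0 : 0 ≤ j) (hjn : j < (pattern.toList.length : Int)) (hs : 1 ≤ PySem.Str.len s) :
    ((PySem.List.pyRange 1 ((pattern.toList.length : Int) - j + 1) 1).map (fun i =>
        (PySem.Str.slice pattern (some j) (some (j + i)), (-i, j)))).find? (fun q => q.1 == s)
      = if PySem.Str.slice pattern (some j) (some (j + PySem.Str.len s)) = s
          then some (s, (-(PySem.Str.len s), j)) else none := by
  rw [List.find?_map]
  simp only [Function.comp_def]
  by_cases hm : PySem.Str.slice pattern (some j) (some (j + PySem.Str.len s)) = s
  · rw [if_pos hm]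
    have hle : PySem.Str.len s ≤ (pattern.toList.length : Int) - j := by
      by_contra hgt
      have := len_slice_of_gt pattern j (PySem.Str.len s) h0 (by omega) (by omega) (by omega)
      rw [hm] at this
      omega
    have hfind : (PySem.List.pyRange 1 ((pattern.toList.length : Int) - j + 1) 1).find?
        (fun i => (PySem.Str.slice pattern (some j) (some (j + i)), (-i, j)).1 == s)
          = some (PySem.Str.len s) := by
      apply find?_eq_some_of_unique
      · rw [PySem.List.mem_pyRange_one]; omega
      · simpa using hm
      · intro x hx hpx
        rw [PySem.List.mem_pyRange_one] at hx
        have hlen := len_slice_of_le pattern j x (by omega) (by omega) (by omega)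
        have hxs : PySem.Str.slice pattern (some j) (some (j + x)) = s := by simpa using hpx
        rw [hxs] at hlen
        omega
    rw [hfind]
    simp only [Option.map_some]
    rw [hm]
  · rw [if_neg hm]
    rw [Option.map_eq_none_iff, List.find?_eq_none]
    intro x hx hpx
    rw [PySem.List.mem_pyRange_one] at hx
    have hlen := len_slice_of_le pattern j x (by omega) (by omega) (by omega)
    have hxs : PySem.Str.slice pattern (some j) (some (j + x)) = s := by simpa using hpx
    rw [hxs] at hlen
    rw [← hlen] at hxs
    exact hm hxs

lemma find?_LB_aux (pattern s : String) (hs : 1 ≤ PySem.Str.len s) :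
    ∀ (k : Nat) (a : Int), 0 ≤ a → ((pattern.toList.length : Int) - a).toNat ≤ k →
      (((PySem.List.pyRange a (pattern.toList.length : Int) 1).flatMap (fun j =>
        (PySem.List.pyRange 1 ((pattern.toList.length : Int) - j + 1) 1).map (fun i =>
          (PySem.Str.slice pattern (some j) (some (j + i)), (-i, j))))).find? (fun q => q.1 == s))
      = ((PySem.List.pyRange a (pattern.toList.length : Int) 1).find? (fun j =>
          PySem.Str.slice pattern (some j) (some (j + PySem.Str.len s)) == s)).map
            (fun j => (s, (-(PySem.Str.len s), j))) := by
  intro k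
  induction k with
  | zero =>
    intro a h0 hk
    rw [PySem.List.pyRange_one_eq_nil (by omega)]
    simp
  | succ k ih =>
    intro a h0 hk
    by_cases hab : a < (pattern.toList.length : Int)
    · rw [PySem.List.pyRange_one_cons hab, List.flatMap_cons, List.find?_append]
      rw [find?_inner pattern s a h0 hab hs]
      by_cases hm : PySem.Str.slice pattern (some a) (some (a + PySem.Str.len s)) = s
      · rw [if_pos hm, List.find?_cons_of_pos (by simpa using hm)]
        rfl
      · rw [if_neg hm, List.find?_cons_of_neg (by simpa using hm)]
        rw [Option.none_or]
        exact ih (a + 1) (by omega) (by omega)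
    · rw [PySem.List.pyRange_one_eq_nil (by omega)]
      simp

lemma find?_LB (pattern s : String) (hs : 1 ≤ PySem.Str.len s) :
    (LB pattern (pattern.toList.length : Int)).find? (fun q => q.1 == s)
      = (jmF pattern (pattern.toList.length : Int) s).map (fun j => (s, (-(PySem.Str.len s), j))) := by
  exact find?_LB_aux pattern s hs ((pattern.toList.length : Int) - 0).toNat 0 le_rfl le_rfl

-- ---------- D rows ----------

def DRows (pattern : String) (n : Int) : Nat → List String
  | 0 => []
  | a + 1 => PySem.Set.ofList (gaRow pattern n ((a : Int) + 1) 0) ++ DRows pattern n a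

lemma mem_gaRow (pattern : String) (n i : Int) (s : String) :
    s ∈ gaRow pattern n i 0 ↔
      ∃ j, 0 ≤ j ∧ j + i ≤ n ∧ s = PySem.Str.slice pattern (some j) (some (j + i)) := by
  unfold gaRow
  simp only [List.mem_map, PySem.List.mem_pyRange_one]
  constructor
  · rintro ⟨j, ⟨h0, h1⟩, rfl⟩; exact ⟨j, h0, by omega, rfl⟩
  · rintro ⟨j, h0, h1, rfl⟩; exact ⟨j, ⟨h0, by omega⟩, rfl⟩

lemma mem_DRows (pattern : String) (n : Int) (s : String) :
    ∀ (a : Nat), (s ∈ DRows pattern n a ↔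
      ∃ i j, 1 ≤ i ∧ i ≤ (a : Int) ∧ 0 ≤ j ∧ j + i ≤ n ∧
        s = PySem.Str.slice pattern (some j) (some (j + i))) := by
  intro a
  induction a with
  | zero =>
    constructor
    · intro h; cases h
    · rintro ⟨i, j, h1, h2, _⟩
      norm_num at h2
      omega
  | succ a ih =>
    show s ∈ PySem.Set.ofList (gaRow pattern n ((a : Int) + 1) 0) ++ DRows pattern n a ↔ _
    rw [List.mem_append, PySem.Set.mem_ofList, mem_gaRow, ih]
    constructor
    · rintro (⟨j, h0, h1, rfl⟩ | ⟨i, j, h1, h2, h0, hin, rfl⟩)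
      · exact ⟨(a : Int) + 1, j, by omega, by push_cast; omega, h0, h1, rfl⟩
      · refine ⟨i, j, h1, by push_cast; omega, h0, hin, rfl⟩
    · rintro ⟨i, j, h1, h2, h0, hin, rfl⟩
      by_cases hia : i = (a : Int) + 1
      · subst hia
        exact Or.inl ⟨j, h0, hin, rfl⟩
      · push_cast at h2
        exact Or.inr ⟨i, j, h1, by omega, h0, hin, rfl⟩

lemma mem_gaRows (pattern : String) (n : Int) (s : String) :
    ∀ (a : Nat), (s ∈ gaRows pattern n a ↔
      ∃ i j, 1 ≤ i ∧ i ≤ (a : Int) ∧ 0 ≤ j ∧ j + i ≤ n ∧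
        s = PySem.Str.slice pattern (some j) (some (j + i))) := by
  intro a
  induction a with
  | zero =>
    constructor
    · intro h; cases h
    · rintro ⟨i, j, h1, h2, _⟩
      norm_num at h2
      omega
  | succ a ih =>
    show s ∈ gaRow pattern n ((a : Int) + 1) 0 ++ gaRows pattern n a ↔ _
    rw [List.mem_append, mem_gaRow, ih]
    constructor
    · rintro (⟨j, h0, h1, rfl⟩ | ⟨i, j, h1, h2, h0, hin, rfl⟩)
      · exact ⟨(a : Int) + 1, j, by omega, by push_cast; omega, h0, h1, rfl⟩
      · refine ⟨i, j, h1, by push_cast; omega, h0, hin, rfl⟩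
    · rintro ⟨i, j, h1, h2, h0, hin, rfl⟩
      by_cases hia : i = (a : Int) + 1
      · subst hia
        exact Or.inl ⟨j, h0, hin, rfl⟩
      · push_cast at h2
        exact Or.inr ⟨i, j, h1, by omega, h0, hin, rfl⟩

lemma ofList_gaRows (pattern : String) :
    ∀ (a : Nat), PySem.Set.ofList (gaRows pattern (pattern.toList.length : Int) a)
      = DRows pattern (pattern.toList.length : Int) a := by
  intro a
  induction a with
  | zero => rfl
  | succ a ih =>
    show PySem.Set.ofList (gaRow pattern (pattern.toList.length : Int) ((a : Int) + 1) 0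
        ++ gaRows pattern (pattern.toList.length : Int) a) = _
    rw [ofList_append_of_disjoint, ih]
    · rfl
    · intro y hy hyrow
      obtain ⟨i, j, h1, h2, h0, hin, rfl⟩ := (mem_gaRows pattern _ y a).mp hy
      obtain ⟨j', h0', hin', heq⟩ := (mem_gaRow pattern _ _ _).mp hyrow
      have l1 := len_slice_of_le pattern j i h0 (by omega) hin
      have l2 := len_slice_of_le pattern j' ((a : Int) + 1) h0' (by omega) hin'
      rw [← heq] at l2
      omega

def Rval (pattern : String) (n : Int) (a b : String) : Prop :=
  -(PySem.Str.len a) < -(PySem.Str.len b) ∨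
    (-(PySem.Str.len a) = -(PySem.Str.len b) ∧ (jmF pattern n a).getD 0 < (jmF pattern n b).getD 0)

lemma rowfind_to_jmF (pattern x : String) (i : Int) (h1 : 1 ≤ i)
    (h2 : i ≤ (pattern.toList.length : Int)) (hlx : PySem.Str.len x = i) :
    (PySem.List.pyRange 0 ((pattern.toList.length : Int) - i + 1) 1).find?
        (fun j => PySem.Str.slice pattern (some j) (some (j + i)) == x)
      = jmF pattern (pattern.toList.length : Int) x := by
  unfold jmF
  simp only [hlx]
  rw [PySem.List.pyRange_one_append 0 ((pattern.toList.length : Int) - i + 1)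
    (pattern.toList.length : Int) (by omega) (by omega)]
  rw [List.find?_append]
  have hnone : (PySem.List.pyRange ((pattern.toList.length : Int) - i + 1)
      (pattern.toList.length : Int) 1).find?
        (fun j => PySem.Str.slice pattern (some j) (some (j + i)) == x) = none := by
    rw [List.find?_eq_none]
    intro j hj hbeq
    rw [PySem.List.mem_pyRange_one] at hj
    have hlen := len_slice_of_gt pattern j i (by omega) (by omega) (by omega) (by omega)
    have hxe : PySem.Str.slice pattern (some j) (some (j + i)) = x := by simpa using hbeq
    rw [hxe, hlx] at hlen
    omega
  rw [hnone]
  cases (PySem.List.pyRange 0 ((pattern.toList.length : Int) - i + 1) 1).find?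
      (fun j => PySem.Str.slice pattern (some j) (some (j + i)) == x) <;> rfl

lemma DRows_pairwise (pattern : String) :
    ∀ (a : Nat), (a : Int) ≤ (pattern.toList.length : Int) →
      (DRows pattern (pattern.toList.length : Int) a).Pairwise
        (Rval pattern (pattern.toList.length : Int)) := by
  intro a
  induction a with
  | zero => intro _; exact List.Pairwise.nil
  | succ a ih =>
    intro ha
    have ha' : (a : Int) ≤ (pattern.toList.length : Int) := by push_cast at ha; omega
    show (PySem.Set.ofList (gaRow pattern (pattern.toList.length : Int) ((a : Int) + 1) 0)
        ++ DRows pattern (pattern.toList.length : Int) a).Pairwise _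
    rw [List.pairwise_append]
    refine ⟨?_, ih ha', ?_⟩
    · have hG := ofList_map_find_pairwise
        (fun j => PySem.Str.slice pattern (some j) (some (j + ((a : Int) + 1))))
        (PySem.List.pyRange 0 ((pattern.toList.length : Int) - ((a : Int) + 1) + 1) 1)
        (PySem.List.pairwise_lt_pyRange_one _ _)
      have hrow : gaRow pattern (pattern.toList.length : Int) ((a : Int) + 1) 0
          = (PySem.List.pyRange 0 ((pattern.toList.length : Int) - ((a : Int) + 1) + 1) 1).map
              (fun j => PySem.Str.slice pattern (some j) (some (j + ((a : Int) + 1)))) := rfl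
      rw [hrow]
      refine List.Pairwise.imp_of_mem ?_ hG
      intro x y hx hy hrel
      obtain ⟨jx, jy, hfx, hfy, hlt⟩ := hrel
      have hxrow : x ∈ gaRow pattern (pattern.toList.length : Int) ((a : Int) + 1) 0 := by
        rw [hrow]
        exact (PySem.Set.mem_ofList _ _).mp hx
      have hyrow : y ∈ gaRow pattern (pattern.toList.length : Int) ((a : Int) + 1) 0 := by
        rw [hrow]
        exact (PySem.Set.mem_ofList _ _).mp hy
      obtain ⟨jx', h0x, hinx, rfl⟩ := (mem_gaRow pattern _ _ _).mp hxrow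
      obtain ⟨jy', h0y, hiny, rfl⟩ := (mem_gaRow pattern _ _ _).mp hyrow
      have hlenx := len_slice_of_le pattern jx' ((a : Int) + 1) h0x (by omega) hinx
      have hleny := len_slice_of_le pattern jy' ((a : Int) + 1) h0y (by omega) hiny
      have hjmx := rowfind_to_jmF pattern _ ((a : Int) + 1) (by omega) (by omega) hlenx
      have hjmy := rowfind_to_jmF pattern _ ((a : Int) + 1) (by omega) (by omega) hleny
      rw [hjmx] at hfx
      rw [hjmy] at hfy
      right
      refine ⟨by rw [hlenx, hleny], ?_⟩
      rw [hfx, hfy]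
      simpa using hlt
    · intro x hx y hy
      obtain ⟨jx', h0x, hinx, rfl⟩ :=
        (mem_gaRow pattern _ _ _).mp ((PySem.Set.mem_ofList _ _).mp hx)
      obtain ⟨i, j, h1, h2, h0, hin, rfl⟩ := (mem_DRows pattern _ _ a).mp hy
      have hlenx := len_slice_of_le pattern jx' ((a : Int) + 1) h0x (by omega) hinx
      have hleny := len_slice_of_le pattern j i h0 (by omega) hin
      left
      rw [hlenx, hleny]
      omega

-- ---------- permutation of the index with the target list ----------

lemma R_perm_M (pattern : String) :
    ((LB pattern (pattern.toList.length : Int)).foldl keyAdd []).Perm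
      ((DRows pattern (pattern.toList.length : Int) pattern.toList.length).map
        (fun s => (s, valOf pattern (pattern.toList.length : Int) s))) := by
  have hndR : ((LB pattern (pattern.toList.length : Int)).foldl keyAdd []).Nodup :=
    List.Nodup.of_map _ (keyfold_nodup _ [] (by simp))
  have hDpw := DRows_pairwise pattern pattern.toList.length le_rfl
  have hndD : (DRows pattern (pattern.toList.length : Int) pattern.toList.length).Nodup := by
    refine List.Pairwise.imp ?_ hDpw
    intro a b h
    intro hab
    subst hab
    rcases h with h | ⟨_, h⟩
    · exact lt_irrefl _ h
    · exact lt_irrefl _ h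
  have hinj : Function.Injective
      (fun s : String => (s, valOf pattern (pattern.toList.length : Int) s)) := by
    intro a b h
    exact congrArg Prod.fst h
  have hndM : ((DRows pattern (pattern.toList.length : Int) pattern.toList.length).map
      (fun s => (s, valOf pattern (pattern.toList.length : Int) s))).Nodup :=
    hndD.map hinj
  rw [List.perm_ext_iff_of_nodup hndR hndM]
  intro p
  rw [keyfold_mem p (LB pattern (pattern.toList.length : Int)) []]
  simp only [List.not_mem_nil, false_or, List.mem_map]
  constructor
  · rintro ⟨-, hf⟩
    have hpLB := List.mem_of_find?_eq_some hf
    have hmem : ∃ j, (0 ≤ j ∧ j < (pattern.toList.length : Int)) ∧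
        ∃ i, (1 ≤ i ∧ i < (pattern.toList.length : Int) - j + 1) ∧
          (PySem.Str.slice pattern (some j) (some (j + i)), (-i, j)) = p := by
      simpa [LB, List.mem_flatMap, List.mem_map, PySem.List.mem_pyRange_one] using hpLB
    obtain ⟨j, ⟨h0, hjn⟩, i, ⟨h1, h2⟩, hpe⟩ := hmem
    have hlen : PySem.Str.len (PySem.Str.slice pattern (some j) (some (j + i))) = i :=
      len_slice_of_le pattern j i h0 (by omega) (by omega)
    have hp1 : p.1 = PySem.Str.slice pattern (some j) (some (j + i)) := by
      rw [← hpe]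
    have hs1 : 1 ≤ PySem.Str.len p.1 := by rw [hp1, hlen]; omega
    rw [find?_LB pattern p.1 hs1] at hf
    cases hjm : jmF pattern (pattern.toList.length : Int) p.1 with
    | none => rw [hjm] at hf; cases hf
    | some j0 =>
      rw [hjm] at hf
      have hpv : (p.1, (-(PySem.Str.len p.1), j0)) = p := by
        injection hf with hf'
      refine ⟨p.1, ?_, ?_⟩
      · rw [(mem_DRows pattern _ _ _)]
        exact ⟨i, j, h1, by omega, h0, by omega, hp1⟩
      · rw [valOf, hjm]
        simpa using hpv
  · rintro ⟨s, hsD, rfl⟩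
    obtain ⟨i, j, h1, h2, h0, hin, hse⟩ := (mem_DRows pattern _ _ _).mp hsD
    have hlen : PySem.Str.len s = i := by rw [hse]; exact len_slice_of_le pattern j i h0 (by omega) hin
    have hs1 : 1 ≤ PySem.Str.len s := by omega
    cases hjm : jmF pattern (pattern.toList.length : Int) s with
    | none =>
      exfalso
      rw [jmF, List.find?_eq_none] at hjm
      refine hjm j ?_ ?_
      · rw [PySem.List.mem_pyRange_one]; omega
      · rw [hlen, ← hse]
        simp
    | some j0 =>
      refine ⟨by simp, ?_⟩
      rw [find?_LB pattern s hs1, hjm]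
      rw [valOf, hjm]
      rfl

-- ---------- sorted2 of a key-sorted permutation ----------

lemma sorted2_eq_of_perm_of_pairwise_lt {α : Type} (xs ys : List α) (k1 k2 : α → Int)
    (hp : ys.Perm xs)
    (hpw : ys.Pairwise (fun a b => k1 a < k1 b ∨ (k1 a = k1 b ∧ k2 a < k2 b))) :
    PySem.List.sorted2 xs k1 k2 = ys := by
  have hfun : (fun (a b : α) =>
        decide (k1 a < k1 b) || (!decide (k1 b < k1 a) && decide (k2 a < k2 b)))
      = (fun (a b : α) => decide (toLex (k1 a, k2 a) < toLex (k1 b, k2 b))) := by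
    funext a b
    by_cases h1 : k1 a < k1 b <;> by_cases h2 : k1 b < k1 a <;> by_cases h3 : k2 a < k2 b <;>
      simp [h1, h2, h3, Prod.Lex.lt_iff] <;> omega
  have h1 : PySem.List.sorted2 xs k1 k2
      = PySem.List.sorted xs (fun x => toLex (k1 x, k2 x)) := by
    rw [PySem.List.sorted_eq_foldl_insertBy]
    show xs.foldl (fun acc x => PySem.List.insertBy
        (fun a b => decide (k1 a < k1 b) || (!decide (k1 b < k1 a) && decide (k2 a < k2 b))) x acc) []
      = _
    rw [hfun]
  rw [h1]
  refine PySem.List.sorted_eq_of_perm_of_pairwise_lt xs ys _ hp ?_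
  refine hpw.imp ?_
  intro a b h
  rw [Prod.Lex.lt_iff]
  simpa using h

-- ---------- main ----------

lemma ga_main (pattern : String) :
    generate_attempts pattern = generate_attempts_alt pattern := by
  have hN : PySem.Str.len pattern = (pattern.toList.length : Int) := by
    rw [PySem.Str.len_eq]
  have hA : generate_attempts pattern
      = DRows pattern (pattern.toList.length : Int) pattern.toList.length := by
    show gaLoop pattern (PySem.Str.len pattern)
        (((PySem.Str.len pattern).toNat + 1) * ((PySem.Str.len pattern).toNat + 1))
        (PySem.Str.len pattern) 0 PySem.Set.empty [] = _
    rw [hN]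
    rw [show (PySem.Set.empty : PySem.Set String) = ([] : List String) from rfl]
    have h1 := gaLoop_rows pattern (pattern.toList.length : Int) pattern.toList.length
        ((((pattern.toList.length : Int)).toNat + 1) * (((pattern.toList.length : Int)).toNat + 1))
        PySem.Set.empty le_rfl (by simp only [Int.toNat_natCast]; nlinarith)
    rw [show (PySem.Set.empty : PySem.Set String) = ([] : List String) from rfl] at h1
    rw [h1, ← PySem.Set.ofList_eq_foldl]
    exact ofList_gaRows pattern pattern.toList.length
  rw [hA, alt_eq, hN, items_dictfold]
  have hempty : (PySem.Dict.empty : PySem.Dict String (Int × Int)).items = [] := rfl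
  rw [hempty]
  have hDpw := DRows_pairwise pattern pattern.toList.length le_rfl
  have hM : ((DRows pattern (pattern.toList.length : Int) pattern.toList.length).map
      (fun s => (s, valOf pattern (pattern.toList.length : Int) s))).Pairwise
        (fun a b => a.2.1 < b.2.1 ∨ (a.2.1 = b.2.1 ∧ a.2.2 < b.2.2)) := by
    rw [List.pairwise_map]
    refine hDpw.imp ?_
    intro a b h
    exact h
  rw [sorted2_eq_of_perm_of_pairwise_lt _
    ((DRows pattern (pattern.toList.length : Int) pattern.toList.length).map
      (fun s => (s, valOf pattern (pattern.toList.length : Int) s)))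
    (fun kv => kv.2.1) (fun kv => kv.2.2) (R_perm_M pattern).symm hM]
  rw [List.map_map]
  exact ((List.map_congr_left (fun s _ => rfl)).trans (List.map_id _)).symm

-- ===== VERDICT (by name: the statement is the Claim_ definition above) =====
theorem generate_attempts_spec : Claim_equal_generate_attempts := by
  intro pattern _
  exact ga_main pattern
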